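-- pv_equiv track=rewrite | github.com/Luxn1er/melhoria-de-cortes | src/helpers.py | compor_padroes_nao_crescentes
-- ===== SOURCE A (Python) =====
-- from typing import Dict, List, Optional, Tuple
--
-- COMPOSICOES_MAX_POR_ALVO = 50_000
--
-- FACAS_MAX = 23
--
-- def compor_padroes_nao_crescentes(alvo: int, partes: List[int]):
--     """
--     Gera composições em ordem não crescente que somam exatamente *alvo*.
--
--     DFS iterativo com pruning (corta ramo se resto < menor peça) e limite
--     de iterações para evitar travamento com bobinas pequenas.
--     """
--     parts = sorted(set(partes), reverse=True)
--     if alvo <= 0 or not parts: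
--         return
--     min_part = parts[-1]
--     stack: list[tuple[int, list[int], int | None]] = [(alvo, [], None)]
--     count = 0
--     while stack:
--         rest, path, max_s = stack.pop()
--         if rest == 0:
--             yield list(path)
--             continue
--         # Pruning: se o resto é menor que a menor peça, este ramo é inútil
--         if rest < min_part:
--             continue
--         # Pruning: número de facas excedido
--         if len(path) >= FACAS_MAX:
--             continue
--         # Limite por alvo
--         count += 1
--         if count > COMPOSICOES_MAX_POR_ALVO:
--             return
--         for w in parts:
--             if w > rest or (max_s is not None and w > max_s):
--                 continue
--             # Pruning: se adicionar esta bobina ultrapassa facas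
--             if len(path) + 1 > FACAS_MAX:
--                 break
--             stack.append((rest - w, path + [w], w))
-- ===== SOURCE B (Python) =====
-- from typing import List
--
-- COMPOSICOES_MAX_POR_ALVO = 50_000
--
-- FACAS_MAX = 23
--
--
-- class _Stop(Exception):
--     """Sentinel used to abort the whole enumeration once the per-target budget is spent."""
--
--
-- def compor_padroes_nao_crescentes(alvo: int, partes: List[int]):
--     """Same enumeration as the iterative version, written as a recursive DFS generator."""
--     parts = sorted(set(partes))  # ascending; the stack machine pops smallest-first anyway
--     if alvo <= 0 or not parts:
--         return
--     min_part = parts[0]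
--     count = 0
--
--     def dfs(rest, path, max_s):
--         nonlocal count
--         if rest == 0:
--             yield list(path)
--             return
--         if rest < min_part:
--             return
--         if len(path) >= FACAS_MAX:
--             return
--         count += 1
--         if count > COMPOSICOES_MAX_POR_ALVO:
--             raise _Stop
--         for w in parts:
--             if w > rest or (max_s is not None and w > max_s):
--                 continue
--             yield from dfs(rest - w, path + [w], w)
--
--     try:
--         yield from dfs(alvo, [], None)
--     except _Stop:
--         return
-- ===== Notes on version B (the rewrite author's own statement) =====
-- stated objective: alternative
-- what changed: Replaced the explicit-stack iterative DFS (tuples pushed/popped with a manual stack list) by a recursive DFS generator over the ascending part list, with the iteration budget enforced by a sentinel exception caught at the top level.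
import Mathlib
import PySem

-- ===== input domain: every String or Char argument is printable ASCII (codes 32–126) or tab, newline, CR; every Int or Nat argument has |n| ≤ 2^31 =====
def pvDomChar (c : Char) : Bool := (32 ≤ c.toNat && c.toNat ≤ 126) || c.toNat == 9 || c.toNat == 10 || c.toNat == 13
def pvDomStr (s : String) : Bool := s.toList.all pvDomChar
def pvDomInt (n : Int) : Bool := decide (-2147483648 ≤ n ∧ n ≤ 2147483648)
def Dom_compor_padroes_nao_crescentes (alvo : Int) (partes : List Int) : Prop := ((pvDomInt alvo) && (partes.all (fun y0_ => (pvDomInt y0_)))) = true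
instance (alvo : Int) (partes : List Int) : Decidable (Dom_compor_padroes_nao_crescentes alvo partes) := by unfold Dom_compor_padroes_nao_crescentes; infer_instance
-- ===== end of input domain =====

-- B replaces A's explicit-stack iterative DFS by a recursive DFS (same enumeration order); alternative decomposition, no speed claim.


-- ===== PORT A =====
-- `max_s is not None and w > max_s`
def ltOpt (maxS : Option Int) (w : Int) : Bool :=
  match maxS with
  | none => false
  | some m => decide (m < w)

-- the inner `for w in parts:` push loop.  Python's `break` on `len(path)+1 > FACAS_MAX` is a
-- loop-invariant condition (independent of w) under which nothing is pushed for the remaining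
-- ws either, so it is transcribed as a skip inside the fold with the same condition.
def pushChildren (parts : List Int) (rest : Int) (path : List Int) (maxS : Option Int)
    (stack : List (Int × List Int × Option Int)) : List (Int × List Int × Option Int) :=
  parts.foldl (fun st w =>
    if rest < w ∨ ltOpt maxS w = true then st
    else if 23 < path.length + 1 then st
    else (rest - w, path ++ [w], some w) :: st) stack

-- bound needed only for loopA's termination measure
theorem pushChildren_length (rest : Int) (path : List Int) (maxS : Option Int) :
    ∀ (parts : List Int) (stack : List (Int × List Int × Option Int)),
      (pushChildren parts rest path maxS stack).length ≤ stack.length + parts.length := by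
  intro parts
  induction parts with
  | nil => intro stack; simp [pushChildren]
  | cons w ws ih =>
    intro stack
    have h1 : pushChildren (w :: ws) rest path maxS stack
        = pushChildren ws rest path maxS
            (if rest < w ∨ ltOpt maxS w = true then stack
             else if 23 < path.length + 1 then stack
             else (rest - w, path ++ [w], some w) :: stack) := by
      simp only [pushChildren, List.foldl_cons]
    rw [h1]
    refine le_trans (ih _) ?_
    split_ifs <;> simp <;> omega

-- the `while stack:` loop; the Lean list's HEAD is the TOP of the Python stack
-- (`stack.pop()` pops the head, appends during the push loop cons onto the head).
def loopA (parts : List Int) (minp : Int)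
    (stack : List (Int × List Int × Option Int)) (count : Nat)
    (acc : List (List Int)) : List (List Int) :=
  match stack with
  | [] => acc
  | (rest, path, maxS) :: st =>
    if rest = 0 then loopA parts minp st count (acc ++ [path])
    else if rest < minp then loopA parts minp st count acc
    else if 23 ≤ path.length then loopA parts minp st count acc
    else if 50000 < count + 1 then acc
    else loopA parts minp (pushChildren parts rest path maxS st) (count + 1) acc
termination_by (50001 - count) * (parts.length + 1) + stack.length
decreasing_by
  · simp only [List.length_cons]; omega
  · simp only [List.length_cons]; omega
  · simp only [List.length_cons]; omega
  · simp only [List.length_cons]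
    have hlen := pushChildren_length rest path maxS parts st
    have hk : (50001 - count) * (parts.length + 1)
        = (50001 - (count + 1)) * (parts.length + 1) + (parts.length + 1) := by
      have h : 50001 - count = (50001 - (count + 1)) + 1 := by omega
      rw [h, Nat.succ_mul]
    rw [hk]
    generalize (50001 - (count + 1)) * (parts.length + 1) = K
    omega

def compor_padroes_nao_crescentes (alvo : Int) (partes : List Int) : List (List Int) :=
  let parts := PySem.List.sorted (PySem.Set.ofList partes) (fun x => x) true
  if alvo ≤ 0 ∨ parts = [] then []
  else
    match parts.getLast? with
    | none => []
    | some minp => loopA parts minp [(alvo, [], none)] 0 []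

-- ===== PORT B =====
-- recursive DFS generator; result = (yields so far, count, aborted-by-budget flag).
-- `d` is a fuel bound on the recursion depth, provably never exhausted from the top-level
-- call (depth ≤ FACAS_MAX = 23 < 24); the fuel-0 branch is unreachable there.
mutual
def dfsB (minp : Int) (asc : List Int) (d : Nat) (rest : Int) (path : List Int)
    (maxS : Option Int) (count : Nat) : List (List Int) × Nat × Bool :=
  if rest = 0 then ([path], count, false)
  else if rest < minp then ([], count, false)
  else if 23 ≤ path.length then ([], count, false)
  else if 50000 < count + 1 then ([], count + 1, true)
  else
    match d with
    | 0 => ([], count + 1, false)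
    | d' + 1 => goB minp asc d' rest path maxS asc (count + 1)
termination_by (d, 0)

-- the `for w in parts:` loop of the recursive dfs (parts ascending in B)
def goB (minp : Int) (asc : List Int) (d : Nat) (rest : Int) (path : List Int)
    (maxS : Option Int) (ws : List Int) (count : Nat) : List (List Int) × Nat × Bool :=
  match ws with
  | [] => ([], count, false)
  | w :: tl =>
    if rest < w ∨ ltOpt maxS w = true then goB minp asc d rest path maxS tl count
    else
      let r := dfsB minp asc d (rest - w) (path ++ [w]) (some w) count
      if r.2.2 then r
      else
        let r2 := goB minp asc d rest path maxS tl r.2.1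
        (r.1 ++ r2.1, r2.2)
termination_by (d, ws.length + 1)
end

def compor_padroes_nao_crescentes_alt (alvo : Int) (partes : List Int) : List (List Int) :=
  let parts := PySem.List.sorted (PySem.Set.ofList partes) (fun x => x) false
  if alvo ≤ 0 then []
  else
    match parts with
    | [] => []
    | minp :: _ => (dfsB minp parts 24 alvo [] none 0).1

-- ===== PRECONDITION & SPEC =====
def Spec_compor_padroes_nao_crescentes (alvo : Int) (partes : List Int) (out : List (List Int)) : Prop := out = compor_padroes_nao_crescentes_alt alvo partes
instance (alvo : Int) (partes : List Int) (out : List (List Int)) : Decidable (Spec_compor_padroes_nao_crescentes alvo partes out) := by unfold Spec_compor_padroes_nao_crescentes; infer_instance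

-- ===== CLAIM (what is proved, stated in full; the proofs are below) =====
def Claim_equal_compor_padroes_nao_crescentes : Prop := ∀ (alvo : Int) (partes : List Int), Dom_compor_padroes_nao_crescentes alvo partes → Spec_compor_padroes_nao_crescentes alvo partes (compor_padroes_nao_crescentes alvo partes)

-- ===== LEMMAS AND PROOFS =====

-- descending sort of a set is the reverse of the ascending sort
theorem sortedRevEq (partes : List Int) :
    PySem.List.sorted (PySem.Set.ofList partes) (fun x => x) true
      = (PySem.List.sorted (PySem.Set.ofList partes) (fun x => x) false).reverse := by
  apply PySem.List.sorted_rev_eq_of_perm_of_pairwise_gt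
  · exact (List.reverse_perm _).trans (PySem.List.sorted_perm _ _ _)
  · exact List.pairwise_reverse.mpr (PySem.List.sorted_ofList_pairwise_lt partes)

-- under the knife-count guard, the push loop is a filter-map prepended to the stack
theorem pushChildren_eq (rest : Int) (path : List Int) (maxS : Option Int)
    (h : path.length + 1 ≤ 23) :
    ∀ (parts : List Int) (stack : List (Int × List Int × Option Int)),
      pushChildren parts rest path maxS stack
        = ((parts.filter fun w => !(decide (rest < w) || ltOpt maxS w)).map
            fun w => (rest - w, path ++ [w], some w)).reverse ++ stack := by
  intro parts
  induction parts with
  | nil => intro stack; simp [pushChildren]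
  | cons w ws ih =>
    intro stack
    have h1 : pushChildren (w :: ws) rest path maxS stack
        = pushChildren ws rest path maxS
            (if rest < w ∨ ltOpt maxS w = true then stack
             else if 23 < path.length + 1 then stack
             else (rest - w, path ++ [w], some w) :: stack) := by
      simp only [pushChildren, List.foldl_cons]
    rw [h1]
    by_cases hs : rest < w ∨ ltOpt maxS w = true
    · have hb : (decide (rest < w) || ltOpt maxS w) = true := by
        rcases hs with h1 | h1 <;> simp [h1]
      have hcond : ¬ (w ≤ rest ∧ ltOpt maxS w = false) := by
        rintro ⟨h1, h2⟩
        rcases hs with h3 | h3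
        · omega
        · rw [h3] at h2; cases h2
      simp [hs, ih, List.filter_cons, hb, hcond]
    · have hs' : ¬ rest < w ∧ ltOpt maxS w = false := by
        constructor
        · exact fun h1 => hs (Or.inl h1)
        · cases hx : ltOpt maxS w
          · rfl
          · exact absurd (Or.inr hx) hs
      simp [hs, Nat.not_lt.mpr h, ih, List.filter_cons, hs'.1, hs'.2,
        Int.not_lt.mp hs'.1, List.reverse_cons, List.append_assoc]

-- one goB round trip: processing the pushed children of a node equals the recursive for-loop
theorem simGo (parts : List Int) (minp : Int) (d : Nat)
    (hsim : ∀ (rest : Int) (path : List Int) (maxS : Option Int) (count : Nat)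
      (acc : List (List Int)) (stack : List (Int × List Int × Option Int)),
      23 ≤ path.length + d →
      loopA parts minp ((rest, path, maxS) :: stack) count acc =
        if (dfsB minp parts.reverse d rest path maxS count).2.2 then
          acc ++ (dfsB minp parts.reverse d rest path maxS count).1
        else
          loopA parts minp stack (dfsB minp parts.reverse d rest path maxS count).2.1
            (acc ++ (dfsB minp parts.reverse d rest path maxS count).1)) :
    ∀ (ws : List Int) (rest : Int) (path : List Int) (maxS : Option Int) (count : Nat)
      (acc : List (List Int)) (stack : List (Int × List Int × Option Int)),
      23 ≤ path.length + 1 + d →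
      loopA parts minp
        (((ws.filter fun w => !(decide (rest < w) || ltOpt maxS w)).map
            fun w => (rest - w, path ++ [w], some w)) ++ stack) count acc =
        if (goB minp parts.reverse d rest path maxS ws count).2.2 then
          acc ++ (goB minp parts.reverse d rest path maxS ws count).1
        else
          loopA parts minp stack (goB minp parts.reverse d rest path maxS ws count).2.1
            (acc ++ (goB minp parts.reverse d rest path maxS ws count).1) := by
  intro ws
  induction ws with
  | nil => intro rest path maxS count acc stack h; simp [goB]
  | cons w tl ih =>
    intro rest path maxS count acc stack h
    by_cases hs : rest < w ∨ ltOpt maxS w = true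
    · have hb : (decide (rest < w) || ltOpt maxS w) = true := by
        rcases hs with h1 | h1 <;> simp [h1]
      rw [goB]
      simp only [List.filter_cons, hb, Bool.not_true, if_pos hs]
      exact ih rest path maxS count acc stack h
    · have hb : (decide (rest < w) || ltOpt maxS w) = false := by
        push_neg at hs
        simp [hs.1, hs.2]
      rw [goB]
      simp only [List.filter_cons, hb, Bool.not_false, if_true, List.map_cons,
        List.cons_append, if_neg hs]
      rw [hsim (rest - w) (path ++ [w]) (some w) count acc _ (by simp; omega)]
      by_cases hf : (dfsB minp parts.reverse d (rest - w) (path ++ [w]) (some w) count).2.2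
      · simp [hf]
      · simp only [hf, if_neg, Bool.false_eq_true, not_false_eq_true, if_false]
        rw [ih rest path maxS _ _ stack h]
        by_cases hf2 : (goB minp parts.reverse d rest path maxS tl
            (dfsB minp parts.reverse d (rest - w) (path ++ [w]) (some w) count).2.1).2.2
        · simp [hf, hf2, List.append_assoc]
        · simp [hf, hf2, List.append_assoc]

-- main simulation: popping one node off the stack equals one recursive dfs call
theorem simA (parts : List Int) (minp : Int) :
    ∀ (d : Nat) (rest : Int) (path : List Int) (maxS : Option Int) (count : Nat)
      (acc : List (List Int)) (stack : List (Int × List Int × Option Int)),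
      23 ≤ path.length + d →
      loopA parts minp ((rest, path, maxS) :: stack) count acc =
        if (dfsB minp parts.reverse d rest path maxS count).2.2 then
          acc ++ (dfsB minp parts.reverse d rest path maxS count).1
        else
          loopA parts minp stack (dfsB minp parts.reverse d rest path maxS count).2.1
            (acc ++ (dfsB minp parts.reverse d rest path maxS count).1) := by
  intro d
  induction d with
  | zero =>
    intro rest path maxS count acc stack h
    rw [loopA, dfsB]
    by_cases h0 : rest = 0
    · simp [h0]
    · by_cases hm : rest < minp
      · simp [h0, hm]
      · have hl : 23 ≤ path.length := by omega
        simp [h0, hm, hl]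
  | succ d' ih =>
    intro rest path maxS count acc stack h
    rw [loopA, dfsB]
    by_cases h0 : rest = 0
    · simp [h0]
    · by_cases hm : rest < minp
      · simp [h0, hm]
      · by_cases hl : 23 ≤ path.length
        · simp [h0, hm, hl]
        · by_cases hc : 50000 < count + 1
          · simp [h0, hm, hl, hc]
          · simp only [h0, hm, hl, hc, if_false, if_neg]
            rw [pushChildren_eq rest path maxS (by omega) parts stack]
            rw [← List.map_reverse, ← List.filter_reverse]
            exact simGo parts minp d' ih parts.reverse rest path maxS (count + 1) acc stack
              (by omega)

-- ===== VERDICT (by name: the statement is the Claim_ definition above) =====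
theorem compor_padroes_nao_crescentes_spec : Claim_equal_compor_padroes_nao_crescentes := by
  intro alvo partes _
  unfold Spec_compor_padroes_nao_crescentes
  simp only [compor_padroes_nao_crescentes, compor_padroes_nao_crescentes_alt]
  rw [sortedRevEq]
  by_cases ha : alvo ≤ 0
  · simp [ha]
  · cases hasc : PySem.List.sorted (PySem.Set.ofList partes) (fun x => x) false with
    | nil => simp [ha, hasc]
    | cons minp t =>
      have hne : (minp :: t).reverse ≠ [] := by simp
      simp only [ha, hne, or_false, if_neg, List.getLast?_reverse, List.head?_cons,
        if_false, Bool.false_eq_true, not_false_eq_true]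
      rw [simA ((minp :: t).reverse) minp 24 alvo [] none 0 [] [] (by simp)]
      rw [List.reverse_reverse]
      by_cases hf : (dfsB minp (minp :: t) 24 alvo [] none 0).2.2
      · simp [hf]
      · simp [hf, loopA]
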